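-- pv_equiv track=rewrite | github.com/denisov-vlad/tripl | backend/src/tripl/json_paths.py | normalize_json_value_paths
-- ===== SOURCE A (Python) =====
-- from collections.abc import Iterable
--
-- def normalize_json_value_paths(paths: Iterable[str] | None) -> list[str]:
--     if not paths:
--         return []
--
--     normalized: list[str] = []
--     seen: set[str] = set()
--     for raw_path in paths:
--         path = raw_path.strip()
--         if not path or "." not in path:
--             continue
--         if path in seen:
--             continue
--         seen.add(path)
--         normalized.append(path)
--     return sorted(normalized)
-- ===== SOURCE B (Python) =====
-- from collections.abc import Iterable
--
-- def normalize_json_value_paths(paths: Iterable[str] | None) -> list[str]: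
--     if not paths:
--         return []
--
--     candidates: list[str] = []
--     for raw_path in paths:
--         path = raw_path.strip()
--         if path and "." in path:
--             candidates.append(path)
--
--     candidates.sort()
--
--     result: list[str] = []
--     for path in candidates:
--         if not result or path != result[-1]:
--             result.append(path)
--     return result
-- ===== Notes on version B (the rewrite author's own statement) =====
-- stated objective: alternative
-- what changed: Replaces the seen-set first-occurrence dedup followed by a sort with collecting all candidates (duplicates kept), sorting once, and removing adjacent duplicates in a single final pass over the sorted list.
import Mathlib
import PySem

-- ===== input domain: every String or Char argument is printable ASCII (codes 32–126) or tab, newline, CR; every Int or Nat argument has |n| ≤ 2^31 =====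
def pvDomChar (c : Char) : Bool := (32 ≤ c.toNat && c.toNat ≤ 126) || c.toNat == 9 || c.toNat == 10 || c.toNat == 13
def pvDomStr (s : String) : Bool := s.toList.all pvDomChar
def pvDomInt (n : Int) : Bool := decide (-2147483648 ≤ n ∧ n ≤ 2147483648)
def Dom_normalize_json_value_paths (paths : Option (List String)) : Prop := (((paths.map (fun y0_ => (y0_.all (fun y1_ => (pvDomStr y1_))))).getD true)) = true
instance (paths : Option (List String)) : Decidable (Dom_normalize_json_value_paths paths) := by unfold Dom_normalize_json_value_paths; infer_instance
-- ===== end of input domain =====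

-- B collects all candidates with duplicates, sorts once, and dedups by removing adjacent
-- duplicates in one final pass, instead of A's seen-set first-occurrence dedup before sorting.


-- ===== PORT A =====
def normalize_json_value_paths (paths : Option (List String)) : List String :=
  match paths with
  | none => []
  | some ps =>
    if ps = [] then []
    else
      let st := ps.foldl (fun (st : List String × PySem.Set String) raw_path =>
        let path := PySem.Str.strip raw_path
        if path = "" ∨ PySem.Str.isIn "." path = false then st
        else if PySem.Set.contains st.2 path then st
        else (st.1 ++ [path], PySem.Set.add st.2 path)) ([], PySem.Set.empty)
      PySem.List.sorted st.1 (fun x => x) false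

-- ===== PORT B =====
def normalize_json_value_paths_alt (paths : Option (List String)) : List String :=
  match paths with
  | none => []
  | some ps =>
    if ps = [] then []
    else
      let candidates := ps.foldl (fun acc raw_path =>
        let path := PySem.Str.strip raw_path
        if ¬ path = "" ∧ PySem.Str.isIn "." path = true then acc ++ [path] else acc) []
      let sortedC := PySem.List.sorted candidates (fun x => x) false
      sortedC.foldl (fun res path =>
        if res = [] ∨ ¬ PySem.List.pyGet? res (-1) = some path then res ++ [path] else res) []

-- ===== PRECONDITION & SPEC =====
def Spec_normalize_json_value_paths (paths : Option (List String)) (out : List String) : Prop := out = normalize_json_value_paths_alt paths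
instance (paths : Option (List String)) (out : List String) : Decidable (Spec_normalize_json_value_paths paths out) := by unfold Spec_normalize_json_value_paths; infer_instance

-- ===== CLAIM (what is proved, stated in full; the proofs are below) =====
def Claim_equal_normalize_json_value_paths : Prop := ∀ (paths : Option (List String)), Dom_normalize_json_value_paths paths → Spec_normalize_json_value_paths paths (normalize_json_value_paths paths)

-- ===== LEMMAS AND PROOFS =====

-- the filtered, stripped candidates (duplicates kept), shared characterization of both loops
def pvCand (ps : List String) : List String :=
  (ps.filter (fun raw => decide (¬ PySem.Str.strip raw = "" ∧ PySem.Str.isIn "." (PySem.Str.strip raw) = true))).map PySem.Str.strip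

-- adjacent-duplicate removal with the previously kept element, structural form of B's final loop
def pvGo : Option String → List String → List String
  | _, [] => []
  | prev, x :: t => if prev = some x then pvGo prev t else x :: pvGo (some x) t

lemma pvGo_cons (prev : Option String) (x : String) (t : List String) :
    pvGo prev (x :: t) = if prev = some x then pvGo prev t else x :: pvGo (some x) t := by
  cases prev <;> rfl

lemma pvCand_cons_skip (raw : String) (t : List String)
    (h : ¬ (¬ PySem.Str.strip raw = "" ∧ PySem.Str.isIn "." (PySem.Str.strip raw) = true)) :
    pvCand (raw :: t) = pvCand t := by
  simp only [pvCand, List.filter_cons, decide_eq_true_eq]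
  rw [if_neg h]

lemma pvCand_cons_keep (raw : String) (t : List String)
    (h : ¬ PySem.Str.strip raw = "" ∧ PySem.Str.isIn "." (PySem.Str.strip raw) = true) :
    pvCand (raw :: t) = PySem.Str.strip raw :: pvCand t := by
  simp only [pvCand, List.filter_cons, decide_eq_true_eq]
  rw [if_pos h]
  rfl

lemma pvB_foldl_eq_go (xs : List String) : ∀ acc : List String,
    xs.foldl (fun res path =>
      if res = [] ∨ ¬ PySem.List.pyGet? res (-1) = some path then res ++ [path] else res) acc
    = acc ++ pvGo acc.getLast? xs := by
  induction xs with
  | nil => intro acc; simp [pvGo]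
  | cons x t ih =>
    intro acc
    by_cases h : acc.getLast? = some x
    · have hne : ¬ acc = [] := by
        intro hnil; simp [hnil] at h
      have hstep : (if acc = [] ∨ ¬ PySem.List.pyGet? acc (-1) = some x then acc ++ [x] else acc)
          = acc := by
        rw [PySem.List.pyGet?_neg_one]
        simp [hne, h]
      rw [List.foldl_cons, hstep, ih acc, pvGo_cons, if_pos h]
    · have hstep : (if acc = [] ∨ ¬ PySem.List.pyGet? acc (-1) = some x then acc ++ [x] else acc)
          = acc ++ [x] := by
        rw [PySem.List.pyGet?_neg_one]
        by_cases hnil : acc = [] <;> simp [hnil, h]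
      have hlast : (acc ++ [x]).getLast? = some x := by simp
      rw [List.foldl_cons, hstep, ih (acc ++ [x]), hlast, pvGo_cons, if_neg h]
      simp

lemma pvB_foldl_nil_eq_go (xs : List String) :
    xs.foldl (fun res path =>
      if res = [] ∨ ¬ PySem.List.pyGet? res (-1) = some path then res ++ [path] else res) []
    = pvGo none xs := by
  rw [pvB_foldl_eq_go]
  rfl

lemma pvGo_subset {a : String} : ∀ (prev : Option String) (xs : List String),
    a ∈ pvGo prev xs → a ∈ xs := by
  intro prev xs
  induction xs generalizing prev with
  | nil => simp [pvGo]
  | cons x t ih =>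
    rw [pvGo_cons]
    split_ifs with h
    · intro ha; exact List.mem_cons_of_mem _ (ih prev ha)
    · intro ha
      rcases List.mem_cons.mp ha with h1 | h1
      · exact h1 ▸ List.mem_cons_self
      · exact List.mem_cons_of_mem _ (ih (some x) h1)

lemma pvGo_mem {a : String} : ∀ (prev : Option String) (xs : List String),
    a ∈ xs → a ∈ pvGo prev xs ∨ prev = some a := by
  intro prev xs
  induction xs generalizing prev with
  | nil => simp
  | cons x t ih =>
    intro ha
    rw [pvGo_cons]
    split_ifs with h
    · rcases List.mem_cons.mp ha with h1 | h1
      · right; rw [h, h1]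
      · exact ih prev h1
    · rcases List.mem_cons.mp ha with h1 | h1
      · left; exact h1 ▸ List.mem_cons_self
      · rcases ih (some x) h1 with h2 | h2
        · left; exact List.mem_cons_of_mem _ h2
        · left; rw [Option.some.injEq] at h2; exact h2 ▸ List.mem_cons_self

lemma pvGo_pairwise : ∀ (xs : List String) (prev : Option String),
    xs.Pairwise (· ≤ ·) → (∀ p, prev = some p → ∀ y ∈ xs, p ≤ y) →
    (pvGo prev xs).Pairwise (· < ·) ∧ (∀ b ∈ pvGo prev xs, ∀ p, prev = some p → p < b) := by
  intro xs
  induction xs with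
  | nil => intro prev _ _; simp [pvGo]
  | cons x t ih =>
    intro prev hpw hprev
    rcases List.pairwise_cons.mp hpw with ⟨hx, ht⟩
    rw [pvGo_cons]
    split_ifs with h
    · exact ih prev ht (fun p hp y hy => hprev p hp y (List.mem_cons_of_mem _ hy))
    · have hih := ih (some x) ht (by
        intro p hp y hy
        rw [Option.some.injEq] at hp
        exact hp ▸ hx y hy)
      constructor
      · refine List.pairwise_cons.mpr ⟨?_, hih.1⟩
        intro b hb
        exact hih.2 b hb x rfl
      · intro b hb p hp
        rcases List.mem_cons.mp hb with h1 | h1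
        · subst h1
          have hle : p ≤ b := hprev p hp b List.mem_cons_self
          have hne : p ≠ b := by
            intro he; exact h (by rw [hp, he])
          exact lt_of_le_of_ne hle hne
        · have hpx : p ≤ x := hprev p hp x List.mem_cons_self
          exact lt_of_le_of_lt hpx (hih.2 b h1 x rfl)

-- A's loop: the accumulated list is a nodup list with exactly the candidates' members
lemma pvA_foldl_inv (ps : List String) : ∀ (n : List String) (s : PySem.Set String),
    (∀ x, x ∈ s ↔ x ∈ n) → n.Nodup →
    (ps.foldl (fun (st : List String × PySem.Set String) raw_path =>
        let path := PySem.Str.strip raw_path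
        if path = "" ∨ PySem.Str.isIn "." path = false then st
        else if PySem.Set.contains st.2 path then st
        else (st.1 ++ [path], PySem.Set.add st.2 path)) (n, s)).1.Nodup ∧
    (∀ x, x ∈ (ps.foldl (fun (st : List String × PySem.Set String) raw_path =>
        let path := PySem.Str.strip raw_path
        if path = "" ∨ PySem.Str.isIn "." path = false then st
        else if PySem.Set.contains st.2 path then st
        else (st.1 ++ [path], PySem.Set.add st.2 path)) (n, s)).1
      ↔ x ∈ n ∨ x ∈ pvCand ps) := by
  induction ps with
  | nil => intro n s _ hn; simpa [pvCand] using hn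
  | cons raw t ih =>
    intro n s hs hn
    simp only [List.foldl_cons]
    by_cases h1 : PySem.Str.strip raw = "" ∨ PySem.Str.isIn "." (PySem.Str.strip raw) = false
    · have hskip : ¬ (¬ PySem.Str.strip raw = "" ∧ PySem.Str.isIn "." (PySem.Str.strip raw) = true) := by
        rcases h1 with h | h
        · exact fun hc => hc.1 h
        · exact fun hc => by rw [hc.2] at h; cases h
      simp only [if_pos h1]
      have := ih n s hs hn
      refine ⟨this.1, fun x => ?_⟩
      rw [this.2 x, pvCand_cons_skip raw t hskip]
    · have hkeep : (¬ PySem.Str.strip raw = "" ∧ PySem.Str.isIn "." (PySem.Str.strip raw) = true) := by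
        refine ⟨(not_or.mp h1).1, ?_⟩
        cases he : PySem.Str.isIn "." (PySem.Str.strip raw)
        · exact absurd he (not_or.mp h1).2
        · rfl
      simp only [if_neg h1]
      by_cases h2 : PySem.Set.contains s (PySem.Str.strip raw)
      · rw [if_pos h2]
        have := ih n s hs hn
        refine ⟨this.1, fun x => ?_⟩
        rw [this.2 x, pvCand_cons_keep raw t hkeep, List.mem_cons]
        have hmem : PySem.Str.strip raw ∈ n := (hs _).mp ((PySem.Set.contains_iff s _).mp h2)
        constructor
        · rintro (h | h)
          · exact Or.inl h
          · exact Or.inr (Or.inr h)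
        · rintro (h | h | h)
          · exact Or.inl h
          · exact Or.inl (h ▸ hmem)
          · exact Or.inr h
      · rw [if_neg h2]
        have hnotn : PySem.Str.strip raw ∉ n := by
          intro hm
          exact h2 ((PySem.Set.contains_iff s _).mpr ((hs _).mpr hm))
        have hs' : ∀ x, x ∈ PySem.Set.add s (PySem.Str.strip raw) ↔ x ∈ n ++ [PySem.Str.strip raw] := by
          intro x
          rw [PySem.Set.mem_add]
          simp [hs x]
        have hn' : (n ++ [PySem.Str.strip raw]).Nodup := by
          simp only [List.nodup_append, List.nodup_singleton]
          exact ⟨hn, trivial, fun a ha b hb he => hnotn ((List.mem_singleton.mp hb ▸ he ▸ ha))⟩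
        have := ih (n ++ [PySem.Str.strip raw]) _ hs' hn'
        refine ⟨this.1, fun x => ?_⟩
        rw [this.2 x, pvCand_cons_keep raw t hkeep, List.mem_cons, List.mem_append,
          List.mem_singleton]
        constructor
        · rintro ((h | h) | h)
          · exact Or.inl h
          · exact Or.inr (Or.inl h)
          · exact Or.inr (Or.inr h)
        · rintro (h | h | h)
          · exact Or.inl (Or.inl h)
          · exact Or.inl (Or.inr h)
          · exact Or.inr h

-- ===== VERDICT (by name: the statement is the Claim_ definition above) =====
theorem normalize_json_value_paths_spec : Claim_equal_normalize_json_value_paths := by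
  intro paths _
  unfold Spec_normalize_json_value_paths normalize_json_value_paths normalize_json_value_paths_alt
  cases paths with
  | none => rfl
  | some ps =>
    show (if ps = [] then [] else
        PySem.List.sorted (ps.foldl (fun (st : List String × PySem.Set String) raw_path =>
          let path := PySem.Str.strip raw_path
          if path = "" ∨ PySem.Str.isIn "." path = false then st
          else if PySem.Set.contains st.2 path then st
          else (st.1 ++ [path], PySem.Set.add st.2 path)) ([], PySem.Set.empty)).1 (fun x => x) false)
      = (if ps = [] then [] else
        (PySem.List.sorted (ps.foldl (fun acc raw_path =>
            let path := PySem.Str.strip raw_path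
            if ¬ path = "" ∧ PySem.Str.isIn "." path = true then acc ++ [path] else acc) [])
            (fun x => x) false).foldl
          (fun res path => if res = [] ∨ ¬ PySem.List.pyGet? res (-1) = some path then res ++ [path] else res) [])
    by_cases hps : ps = []
    · rw [if_pos hps, if_pos hps]
    · rw [if_neg hps, if_neg hps]
      rw [PySem.List.foldl_append_ite
        (p := fun raw => ¬ PySem.Str.strip raw = "" ∧ PySem.Str.isIn "." (PySem.Str.strip raw) = true)
        (f := PySem.Str.strip)]
      rw [pvB_foldl_nil_eq_go]
      have hcand : (List.map PySem.Str.strip (List.filter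
          (fun x => decide (¬ PySem.Str.strip x = "" ∧ PySem.Str.isIn "." (PySem.Str.strip x) = true)) ps))
          = pvCand ps := rfl
      rw [hcand, List.nil_append]
      have hsempty : ∀ x : String, x ∈ (PySem.Set.empty : PySem.Set String) ↔ x ∈ ([] : List String) := by
        intro x; rfl
      have hinv := pvA_foldl_inv ps [] PySem.Set.empty hsempty List.nodup_nil
      have hpw := PySem.List.sorted_pairwise (pvCand ps) (fun x => x)
      have hgo := pvGo_pairwise (PySem.List.sorted (pvCand ps) (fun x => x) false) none
        hpw (by intro p hp; cases hp)
      have hnodup : (pvGo none (PySem.List.sorted (pvCand ps) (fun x => x) false)).Nodup :=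
        hgo.1.imp (fun h => ne_of_lt h)
      have hmemgo : ∀ x : String,
          x ∈ pvGo none (PySem.List.sorted (pvCand ps) (fun x => x) false) ↔ x ∈ pvCand ps := by
        intro x
        constructor
        · intro hx
          exact (PySem.List.mem_sorted (pvCand ps) (fun x => x) false x).mp (pvGo_subset none _ hx)
        · intro hx
          rcases pvGo_mem none _ ((PySem.List.mem_sorted (pvCand ps) (fun x => x) false x).mpr hx) with h | h
          · exact h
          · cases h
      have hperm : (pvGo none (PySem.List.sorted (pvCand ps) (fun x => x) false)).Perm
          (ps.foldl (fun (st : List String × PySem.Set String) raw_path =>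
            let path := PySem.Str.strip raw_path
            if path = "" ∨ PySem.Str.isIn "." path = false then st
            else if PySem.Set.contains st.2 path then st
            else (st.1 ++ [path], PySem.Set.add st.2 path)) ([], PySem.Set.empty)).1 := by
        rw [List.perm_ext_iff_of_nodup hnodup hinv.1]
        intro a
        rw [hmemgo a, hinv.2 a]
        simp
      rw [PySem.List.sorted_eq_of_perm_of_pairwise_lt _ _ (fun x : String => x) hperm hgo.1]
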